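-- pv_equiv track=rewrite | github.com/EcoMole/NORA | apps/api/logic/xlsx_export.py | process_synonyms
-- ===== SOURCE A (Python) =====
-- def serialize_synonyms(synonyms):
--     names = []
--     for synonym in synonyms:
--         names.append(synonym.get("title", ""))
--
--     return " ; ".join(names)
--
-- def process_synonyms(synonyms):
--     serialized_common_names = ""
--     serialized_trade_names = ""
--     serialized_synonyms = None
--     if len(synonyms) > 0:
--         if synonyms[0].get("typeTitle", "") != "":
--             common_names = [
--                 synonym for synonym in synonyms if synonym["typeTitle"] == "common name"
--             ]
--             trade_names = [
--                 synonym for synonym in synonyms if synonym["typeTitle"] == "trade name"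
--             ]
--             serialized_common_names = serialize_synonyms(common_names)
--             serialized_trade_names = serialize_synonyms(trade_names)
--         else:
--             serialized_synonyms = serialize_synonyms(synonyms)
--     else:
--         serialized_synonyms = serialize_synonyms(synonyms)
--     return serialized_common_names, serialized_trade_names, serialized_synonyms
-- ===== SOURCE B (Python) =====
-- def process_synonyms(synonyms):
--     if not synonyms:
--         return "", "", ""
--     if synonyms[0].get("typeTitle", "") == "":
--         return "", "", " ; ".join(s.get("title", "") for s in synonyms)
--     common_names = []
--     trade_names = []
--     for synonym in synonyms:
--         t = synonym["typeTitle"]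
--         title = synonym.get("title", "")
--         if t == "common name":
--             common_names.append(title)
--         elif t == "trade name":
--             trade_names.append(title)
--     return " ; ".join(common_names), " ; ".join(trade_names), None
-- ===== Notes on version B (the rewrite author's own statement) =====
-- stated objective: alternative
-- what changed: The grouped branch does one pass over synonyms, dispatching each title into a common-names or trade-names accumulator, instead of two independent filter passes each followed by a serialization pass; the empty/untyped branches inline the join.
import Mathlib
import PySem

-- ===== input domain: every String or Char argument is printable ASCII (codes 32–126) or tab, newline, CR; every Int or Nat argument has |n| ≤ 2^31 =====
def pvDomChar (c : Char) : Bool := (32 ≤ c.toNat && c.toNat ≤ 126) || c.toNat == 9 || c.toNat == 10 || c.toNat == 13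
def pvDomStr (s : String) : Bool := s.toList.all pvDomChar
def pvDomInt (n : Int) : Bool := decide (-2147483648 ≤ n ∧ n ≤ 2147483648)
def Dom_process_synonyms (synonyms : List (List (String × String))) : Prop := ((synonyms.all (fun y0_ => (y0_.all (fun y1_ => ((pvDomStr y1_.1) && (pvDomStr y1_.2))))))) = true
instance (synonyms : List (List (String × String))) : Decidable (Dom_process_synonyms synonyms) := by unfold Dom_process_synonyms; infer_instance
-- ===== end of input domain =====

-- B rewrites the grouped branch of A as a single accumulating pass (alternative decomposition, same cost);
-- equivalence is about the return value only (neither program mutates its argument).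

-- ===== PORT A =====
-- synonym.get(k, d) on a dict given as an association list
def pvGetD (s : List (String × String)) (k d : String) : String :=
  PySem.Dict.getD ⟨s⟩ k d

-- synonym[k] — hard access; none = KeyError (excluded by Pre_)
def pvGet? (s : List (String × String)) (k : String) : Option String :=
  PySem.Dict.get? ⟨s⟩ k

def serialize_synonyms (synonyms : List (List (String × String))) : String :=
  let names := synonyms.foldl (fun ns s => ns ++ [pvGetD s "title" ""]) ([] : List String)
  PySem.Str.join " ; " names

def process_synonyms (synonyms : List (List (String × String))) : String × String × Option String :=
  if synonyms.length > 0 then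
    if pvGetD synonyms.headI "typeTitle" "" ≠ "" then
      let common_names := synonyms.filter (fun s => pvGet? s "typeTitle" == some "common name")
      let trade_names := synonyms.filter (fun s => pvGet? s "typeTitle" == some "trade name")
      (serialize_synonyms common_names, serialize_synonyms trade_names, none)
    else
      ("", "", some (serialize_synonyms synonyms))
  else
    ("", "", some (serialize_synonyms synonyms))

-- ===== PORT B =====
-- one pass of B's grouped branch: dispatch each title into the common/trade accumulators
def pvDispatch (acc : List String × List String) (s : List (String × String)) :
    List String × List String :=
  let t := pvGet? s "typeTitle"
  let title := pvGetD s "title" ""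
  if t == some "common name" then (acc.1 ++ [title], acc.2)
  else if t == some "trade name" then (acc.1, acc.2 ++ [title])
  else acc

def process_synonyms_alt (synonyms : List (List (String × String))) : String × String × Option String :=
  if synonyms.isEmpty then ("", "", some "")
  else if pvGetD synonyms.headI "typeTitle" "" == "" then
    ("", "", some (PySem.Str.join " ; " (synonyms.map (fun s => pvGetD s "title" ""))))
  else
    let p := synonyms.foldl pvDispatch ([], [])
    (PySem.Str.join " ; " p.1, PySem.Str.join " ; " p.2, none)

-- ===== PRECONDITION & SPEC =====
-- Pre_ excludes exactly the inputs on which Python A raises KeyError (B raises there too):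
-- when the first synonym has a nonempty typeTitle, every synonym must carry the "typeTitle" key.
def Pre_process_synonyms (synonyms : List (List (String × String))) : Prop :=
  (synonyms ≠ [] ∧ pvGetD synonyms.headI "typeTitle" "" ≠ "") →
    ∀ s ∈ synonyms, PySem.Dict.contains (⟨s⟩ : PySem.Dict String String) "typeTitle" = true
instance (synonyms : List (List (String × String))) : Decidable (Pre_process_synonyms synonyms) := by unfold Pre_process_synonyms; infer_instance

def pvWitness_process_synonyms : (List (List (String × String))) :=
  [[("typeTitle", "common name"), ("title", "a")], [("typeTitle", "trade name"), ("title", "b")]]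

def Spec_process_synonyms (synonyms : List (List (String × String))) (out : String × String × Option String) : Prop := out = process_synonyms_alt synonyms
instance (synonyms : List (List (String × String))) (out : String × String × Option String) : Decidable (Spec_process_synonyms synonyms out) := by unfold Spec_process_synonyms; infer_instance

-- ===== CLAIM (what is proved, stated in full; the proofs are below) =====
def Claim_equal_process_synonyms : Prop := ∀ (synonyms : List (List (String × String))), Dom_process_synonyms synonyms → Pre_process_synonyms synonyms → Spec_process_synonyms synonyms (process_synonyms synonyms)

-- ===== LEMMAS AND PROOFS =====

theorem serialize_eq_map (xs : List (List (String × String))) :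
    serialize_synonyms xs = PySem.Str.join " ; " (xs.map (fun s => pvGetD s "title" "")) := by
  unfold serialize_synonyms
  rw [PySem.List.foldl_append_singleton_eq_map]
  simp

theorem dispatch_fold (xs : List (List (String × String))) (c t : List String) :
    xs.foldl pvDispatch (c, t) =
      (c ++ (xs.filter (fun s => pvGet? s "typeTitle" == some "common name")).map
              (fun s => pvGetD s "title" ""),
       t ++ (xs.filter (fun s => pvGet? s "typeTitle" == some "trade name")).map
              (fun s => pvGetD s "title" "")) := by
  induction xs generalizing c t with
  | nil => simp
  | cons s rest ih =>
    simp only [List.foldl_cons, List.filter_cons]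
    by_cases hc : pvGet? s "typeTitle" = some "common name"
    · have ht : (pvGet? s "typeTitle" == some "trade name") = false := by
        simp [hc]
      simp [pvDispatch, hc, ih]
    · by_cases ht : pvGet? s "typeTitle" = some "trade name"
      · have hc' : (pvGet? s "typeTitle" == some "common name") = false := by
          simp [ht]
        simp [pvDispatch, ht, ih]
      · have hc' : (pvGet? s "typeTitle" == some "common name") = false := by simp [hc]
        have ht' : (pvGet? s "typeTitle" == some "trade name") = false := by simp [ht]
        simp [pvDispatch, hc', ht', ih]

-- ===== VERDICT (by name: the statement is the Claim_ definition above) =====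
theorem process_synonyms_spec : Claim_equal_process_synonyms := by
  intro synonyms _dom _pre
  unfold Spec_process_synonyms process_synonyms process_synonyms_alt
  cases synonyms with
  | nil =>
    simp [serialize_eq_map]
    decide
  | cons s rest =>
    simp only [List.length_cons, List.isEmpty_cons, List.headI_cons]
    by_cases h : pvGetD s "typeTitle" "" = ""
    · simp [h, serialize_eq_map]
    · have h' : (pvGetD s "typeTitle" "" == "") = false := by simp [h]
      simp only [h']
      rw [dispatch_fold]
      simp [serialize_eq_map, h]
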